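-- pv_equiv track=rewrite | github.com/rmisegal/skill-python-base | src/qa_engine/table/detection/fancy_table_detector.py | _in_hebrewtable
-- ===== SOURCE A (Python) =====
-- def _in_hebrewtable(line_num: int, content: str) -> bool:
--     """Check if inside hebrewtable environment."""
--     lines = content.split("\n")
--     for i in range(line_num - 1, max(0, line_num - 20), -1):
--         if r"\begin{hebrewtable}" in lines[i]:
--             return True
--         if r"\end{hebrewtable}" in lines[i]:
--             return False
--     return False
-- ===== SOURCE B (Python) =====
-- def _in_hebrewtable(line_num: int, content: str) -> bool:
--     """Check if inside hebrewtable environment."""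
--     lines = content.split("\n")
--     lo = max(0, line_num - 20) + 1
--     window = [lines[i] for i in range(lo, line_num)]
--     last_begin = -1
--     last_end = -1
--     for idx, ln in enumerate(window):
--         if r"\begin{hebrewtable}" in ln:
--             last_begin = idx
--         if r"\end{hebrewtable}" in ln:
--             last_end = idx
--     return last_begin >= 0 and last_end <= last_begin
-- ===== Notes on version B (the rewrite author's own statement) =====
-- stated objective: alternative
-- what changed: Replaces A's backward early-return index scan with materialising the 19-line window and a single forward enumerate pass recording the last line index containing each marker, deciding by comparing the two indices (begin wins ties within a line).
import Mathlib
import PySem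

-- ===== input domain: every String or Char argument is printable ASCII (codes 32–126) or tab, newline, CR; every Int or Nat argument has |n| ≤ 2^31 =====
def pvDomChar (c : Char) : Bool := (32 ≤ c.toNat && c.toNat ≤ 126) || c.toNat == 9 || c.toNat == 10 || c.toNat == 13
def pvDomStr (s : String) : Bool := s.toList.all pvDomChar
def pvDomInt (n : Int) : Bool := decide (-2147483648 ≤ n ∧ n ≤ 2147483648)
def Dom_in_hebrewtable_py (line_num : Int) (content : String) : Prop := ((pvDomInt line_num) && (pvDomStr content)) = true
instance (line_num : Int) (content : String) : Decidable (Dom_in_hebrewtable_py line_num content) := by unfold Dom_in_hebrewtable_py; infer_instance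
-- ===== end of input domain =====

-- B replaces A's backward early-return index scan with slicing out the window and one
-- forward pass recording the last line index of each marker (objective: alternative, same cost).

def hbBegin : String := "\\begin{hebrewtable}"
def hbEnd : String := "\\end{hebrewtable}"

-- ===== PORT A =====
-- the backward for-loop with its two early returns, as structural recursion on the index list
def pyLoopA (lines : List String) : List Int → Bool
  | [] => false
  | i :: rest =>
    match PySem.List.pyGet? lines i with
    | none => false  -- IndexError in Python; excluded by Pre_
    | some ln =>
      if PySem.Str.isIn hbBegin ln then true
      else if PySem.Str.isIn hbEnd ln then false
      else pyLoopA lines rest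

def in_hebrewtable_py (line_num : Int) (content : String) : Bool :=
  let lines := ((PySem.Str.split? content "\n").getD [])
  pyLoopA lines (PySem.List.pyRange (line_num - 1) (max 0 (line_num - 20)) (-1))

-- ===== PORT B =====
-- loop body of B: update the pair (last_begin, last_end) from one enumerated window line
def altStep (st : Int × Int) (p : Int × String) : Int × Int :=
  let st1 := if PySem.Str.isIn hbBegin p.2 then (p.1, st.2) else st
  if PySem.Str.isIn hbEnd p.2 then (st1.1, p.1) else st1

def in_hebrewtable_py_alt (line_num : Int) (content : String) : Bool :=
  let lines := ((PySem.Str.split? content "\n").getD [])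
  let lo := max 0 (line_num - 20) + 1
  -- the comprehension [lines[i] for i in range(lo, line_num)]; IndexError excluded by Pre_
  let window := (PySem.List.pyRange lo line_num 1).map
    (fun i => (PySem.List.pyGet? lines i).getD "")
  let st := (PySem.List.enumerate window 0).foldl altStep (-1, -1)
  decide (0 ≤ st.1 ∧ st.2 ≤ st.1)

-- ===== PRECONDITION & SPEC =====
-- Pre_ excludes exactly the inputs on which A raises IndexError: line_num exceeding
-- the number of lines makes the backward loop read past the end of `lines`.
def Pre_in_hebrewtable_py (line_num : Int) (content : String) : Prop :=
  line_num ≤ ((((PySem.Str.split? content "\n").getD [])).length : Int)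
instance (line_num : Int) (content : String) : Decidable (Pre_in_hebrewtable_py line_num content) := by unfold Pre_in_hebrewtable_py; infer_instance
def pvWitness_in_hebrewtable_py : Int × String := (2, "\\begin{hebrewtable}\nx")

def Spec_in_hebrewtable_py (line_num : Int) (content : String) (out : Bool) : Prop := out = in_hebrewtable_py_alt line_num content
instance (line_num : Int) (content : String) (out : Bool) : Decidable (Spec_in_hebrewtable_py line_num content out) := by unfold Spec_in_hebrewtable_py; infer_instance

-- ===== CLAIM (what is proved, stated in full; the proofs are below) =====
def Claim_equal_in_hebrewtable_py : Prop := ∀ (line_num : Int) (content : String), Dom_in_hebrewtable_py line_num content → Pre_in_hebrewtable_py line_num content → Spec_in_hebrewtable_py line_num content (in_hebrewtable_py line_num content)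

-- ===== LEMMAS AND PROOFS =====

-- A's backward scan with early returns, expressed on the list of scanned lines
def firstMarker : List String → Bool
  | [] => false
  | ln :: rest =>
    if PySem.Str.isIn hbBegin ln then true
    else if PySem.Str.isIn hbEnd ln then false
    else firstMarker rest

theorem pyLoopA_eq_firstMarker (lines : List String) (l : List Int)
    (h : ∀ i ∈ l, (PySem.List.pyGet? lines i).isSome) :
    pyLoopA lines l = firstMarker (l.map (fun i => (PySem.List.pyGet? lines i).getD "")) := by
  induction l with
  | nil => rfl
  | cons i rest ih =>
    obtain ⟨ln, hln⟩ := Option.isSome_iff_exists.mp (h i List.mem_cons_self)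
    rw [List.map_cons, pyLoopA, hln]
    simp only [Option.getD_some, firstMarker]
    rw [ih (fun j hj => h j (List.mem_cons_of_mem _ hj))]
    rfl

theorem pyGet?_isSome_of_lt (lines : List String) (i : Int)
    (h0 : 0 ≤ i) (h1 : i < (lines.length : Int)) :
    (PySem.List.pyGet? lines i).isSome := by
  obtain ⟨n, rfl⟩ := Int.eq_ofNat_of_zero_le h0
  rw [PySem.List.pyGet?_natCast]
  simp
  omega

theorem enumerate_append_singleton {α : Type} (xs : List α) (x : α) (s : Int) :
    PySem.List.enumerate (xs ++ [x]) s
      = PySem.List.enumerate xs s ++ [(s + (xs.length : Int), x)] := by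
  induction xs generalizing s with
  | nil => simp [PySem.List.enumerate_nil, PySem.List.enumerate_cons]
  | cons y ys ih =>
    simp only [List.cons_append, PySem.List.enumerate_cons, ih (s + 1), List.length_cons]
    have harith : s + 1 + ((ys.length : Nat) : Int) = s + (((ys.length + 1 : Nat)) : Int) := by
      push_cast; ring
    rw [harith]

theorem foldl_enumerate_spec (ws : List String) :
    ((PySem.List.enumerate ws 0).foldl altStep (-1, -1)).1 < (ws.length : Int) ∧
    ((PySem.List.enumerate ws 0).foldl altStep (-1, -1)).2 < (ws.length : Int) ∧
    (decide (0 ≤ ((PySem.List.enumerate ws 0).foldl altStep (-1, -1)).1 ∧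
        ((PySem.List.enumerate ws 0).foldl altStep (-1, -1)).2
          ≤ ((PySem.List.enumerate ws 0).foldl altStep (-1, -1)).1)
      = firstMarker ws.reverse) := by
  induction ws using List.reverseRecOn with
  | nil =>
    simp [PySem.List.enumerate_nil, firstMarker]
  | append_singleton ws ln ih =>
    obtain ⟨hb, he, hdec⟩ := ih
    rw [enumerate_append_singleton, List.foldl_append]
    simp only [List.foldl_cons, List.foldl_nil, List.reverse_append, List.reverse_singleton,
      List.singleton_append, List.length_append, List.length_singleton]
    set st := (PySem.List.enumerate ws 0).foldl altStep (-1, -1) with hst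
    rw [firstMarker]
    unfold altStep
    by_cases h1 : PySem.Str.isIn hbBegin ln = true <;>
      by_cases h2 : PySem.Str.isIn hbEnd ln = true <;>
        simp only [h1, h2, if_true, if_false, Bool.false_eq_true] <;>
        push_cast <;>
        refine ⟨by omega, by omega, ?_⟩
    · simp only [decide_eq_true_eq]; omega
    · simp only [decide_eq_true_eq]; omega
    · simp only [decide_eq_false_iff_not]; omega
    · exact hdec

-- ===== VERDICT (by name: the statement is the Claim_ definition above) =====
theorem in_hebrewtable_py_spec : Claim_equal_in_hebrewtable_py := by
  intro line_num content _ hpre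
  unfold Spec_in_hebrewtable_py
  unfold Pre_in_hebrewtable_py at hpre
  simp only [in_hebrewtable_py, in_hebrewtable_py_alt]
  set lines := ((PySem.Str.split? content "\n").getD []) with hl
  set lo := max 0 (line_num - 20) + 1 with hlo
  have hrev : PySem.List.pyRange (line_num - 1) (max 0 (line_num - 20)) (-1)
      = (PySem.List.pyRange lo line_num 1).reverse := by
    rw [PySem.List.pyRange_neg_one_eq_reverse]
    norm_num [hlo]
  rw [hrev, pyLoopA_eq_firstMarker _ _ (by
    intro i hi
    rw [List.mem_reverse, PySem.List.mem_pyRange_one] at hi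
    exact pyGet?_isSome_of_lt lines i (by omega) (by omega)), List.map_reverse]
  exact (foldl_enumerate_spec _).2.2.symm
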